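-- pv_equiv track=rewrite | github.com/wdebsqi/bimba | src/rest_api/src/RoutePicker.py | _count_num_of_changes
-- ===== SOURCE A (Python) =====
-- def _count_num_of_changes(lines_chosen: list[str]) -> int:
--     """Counts the total number of changes in the route."""
--     if len(lines_chosen) <= 1:
--         return 0
--
--     result = 0
--     for i, line in enumerate(lines_chosen[1:], 1):
--         previous_line = lines_chosen[i - 1]
--         if line != previous_line:
--             result += 1
--
--     return result
-- ===== SOURCE B (Python) =====
-- def _count_num_of_changes(lines_chosen: list[str]) -> int:
--     """Counts the total number of changes in the route."""
--     if len(lines_chosen) <= 1: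
--         return 0
--     # count maximal runs of consecutive equal lines, then changes = runs - 1
--     groups = 0
--     i = 0
--     n = len(lines_chosen)
--     while i < n:
--         j = i + 1
--         while j < n and lines_chosen[j] == lines_chosen[i]:
--             j += 1
--         groups += 1
--         i = j
--     return groups - 1
-- ===== Notes on version B (the rewrite author's own statement) =====
-- stated objective: alternative
-- what changed: Replaces the index-based pairwise neighbour comparison with run-length segmentation: B skips over each maximal run of consecutive equal lines, counts the runs, and returns runs - 1.
import Mathlib
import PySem

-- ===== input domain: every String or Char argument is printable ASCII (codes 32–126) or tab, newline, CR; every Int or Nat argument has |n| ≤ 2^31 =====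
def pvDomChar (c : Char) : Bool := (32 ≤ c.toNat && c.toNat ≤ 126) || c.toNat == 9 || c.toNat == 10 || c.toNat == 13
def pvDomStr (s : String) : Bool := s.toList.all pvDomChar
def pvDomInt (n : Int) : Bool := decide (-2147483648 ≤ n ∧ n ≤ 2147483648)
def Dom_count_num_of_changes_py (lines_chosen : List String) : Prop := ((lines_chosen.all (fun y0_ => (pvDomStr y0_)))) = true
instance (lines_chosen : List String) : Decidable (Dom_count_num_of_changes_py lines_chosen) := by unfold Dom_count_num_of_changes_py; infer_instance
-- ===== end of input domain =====

-- B replaces the pairwise neighbour comparison with run-length segmentation (count maximal runs of equal lines, return runs - 1); same cost, different decomposition.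


-- ===== PORT A =====
def count_num_of_changes_py (lines_chosen : List String) : Int :=
  if lines_chosen.length ≤ 1 then 0
  else
    (PySem.List.enumerate (PySem.List.slice lines_chosen (some 1) none) 1).foldl
      (fun result p =>
        let previous_line := PySem.List.pyGetD lines_chosen (p.1 - 1) ""
        if p.2 ≠ previous_line then result + 1 else result) 0

-- ===== PORT B =====
-- outer while loop of Source B: each step consumes one maximal run (inner while = dropWhile)
def pvCountGroups : List String → Int
  | [] => 0
  | x :: rest => 1 + pvCountGroups (rest.dropWhile (fun y => y == x))
termination_by xs => xs.length
decreasing_by simpa using Nat.lt_succ_of_le (List.length_dropWhile_le _ _)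

def count_num_of_changes_py_alt (lines_chosen : List String) : Int :=
  if lines_chosen.length ≤ 1 then 0
  else pvCountGroups lines_chosen - 1

-- ===== PRECONDITION & SPEC =====
def Spec_count_num_of_changes_py (lines_chosen : List String) (out : Int) : Prop := out = count_num_of_changes_py_alt lines_chosen
instance (lines_chosen : List String) (out : Int) : Decidable (Spec_count_num_of_changes_py lines_chosen out) := by unfold Spec_count_num_of_changes_py; infer_instance

-- ===== CLAIM (what is proved, stated in full; the proofs are below) =====
def Claim_equal_count_num_of_changes_py : Prop := ∀ (lines_chosen : List String), Dom_count_num_of_changes_py lines_chosen → Spec_count_num_of_changes_py lines_chosen (count_num_of_changes_py lines_chosen)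

-- ===== LEMMAS AND PROOFS =====

-- number of adjacent transitions when the previous line is p and the remaining lines are the list
def pvPairCount : String → List String → Int
  | _, [] => 0
  | p, y :: ys => (if y ≠ p then 1 else 0) + pvPairCount y ys

lemma pvGetD_append_len (pre : List String) (x : String) (t : List String) (d : String) :
    (pre ++ x :: t).getD pre.length d = x := by
  simp [List.getD_eq_getElem?_getD]

-- A's fold over the enumerated tail equals the pairwise transition count
lemma pvFoldA : ∀ (rest pre : List String) (x : String) (acc : Int),
    (PySem.List.enumerate rest ((pre.length + 1 : Nat) : Int)).foldl
      (fun result p =>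
        let previous_line := PySem.List.pyGetD (pre ++ x :: rest) (p.1 - 1) ""
        if p.2 ≠ previous_line then result + 1 else result) acc
    = acc + pvPairCount x rest := by
  intro rest
  induction rest with
  | nil => intro pre x acc; simp [PySem.List.enumerate, pvPairCount]
  | cons y t ih =>
    intro pre x acc
    rw [PySem.List.enumerate_cons, List.foldl_cons]
    have hidx : ((pre.length + 1 : Nat) : Int) - 1 = ((pre.length : Nat) : Int) := by
      push_cast; ring
    have hstart : ((pre.length + 1 : Nat) : Int) + 1 = (((pre ++ [x]).length + 1 : Nat) : Int) := by
      simp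
    simp only [hidx, PySem.List.pyGetD_natCast, pvGetD_append_len]
    rw [hstart, show pre ++ x :: y :: t = (pre ++ [x]) ++ y :: t by simp,
        ih (pre ++ [x]) y]
    simp only [pvPairCount]
    split_ifs
    all_goals ring

lemma pvPairCount_const : ∀ (w : List String) (x : String) (s : List String),
    (∀ a ∈ w, a = x) → pvPairCount x (w ++ s) = pvPairCount x s := by
  intro w
  induction w with
  | nil => intro _ _ _; rfl
  | cons a w' ih =>
    intro x s h
    have ha : a = x := h a (by simp)
    subst ha
    simp only [List.cons_append, pvPairCount]
    rw [if_neg (fun hc => hc rfl), ih a s (fun b hb => h b (by simp [hb])), zero_add]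

lemma pvMemTakeWhileEq {xs : List String} {x a : String}
    (ha : a ∈ xs.takeWhile (fun y => y == x)) : a = x :=
  eq_of_beq (List.mem_takeWhile_imp (p := fun y => y == x) ha)

lemma pvGroups_eq : ∀ (n : Nat) (xs : List String), xs.length ≤ n → ∀ x,
    pvCountGroups (x :: xs) = 1 + pvPairCount x xs := by
  intro n
  induction n with
  | zero =>
    intro xs h x
    have : xs = [] := List.eq_nil_of_length_eq_zero (Nat.le_zero.mp h)
    subst this
    simp [pvCountGroups, pvPairCount]
  | succ n ih =>
    intro xs hlen x
    rw [pvCountGroups]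
    rcases h : xs.dropWhile (fun y => y == x) with _ | ⟨y, t⟩
    · have hall : ∀ a ∈ xs, a = x := by
        intro a ha
        have htw : xs.takeWhile (fun y => y == x) ++ xs.dropWhile (fun y => y == x) = xs :=
          List.takeWhile_append_dropWhile
        rw [h, List.append_nil] at htw
        exact pvMemTakeWhileEq (xs := xs) (by rw [htw]; exact ha)
      have : pvPairCount x xs = 0 := by
        have := pvPairCount_const xs x [] hall
        simpa using this
      simp [pvCountGroups, this]
    · have hy : (y == x) = false := by
        have hne : xs.dropWhile (fun y => y == x) ≠ [] := by simp [h]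
        have := List.head_dropWhile_not (fun y => y == x) hne
        rwa [show (xs.dropWhile (fun y => y == x)).head hne = y by simp [h]] at this
      have hsplit : xs = xs.takeWhile (fun y => y == x) ++ y :: t := by
        conv_lhs => rw [← List.takeWhile_append_dropWhile (p := fun y => y == x) (l := xs)]
        rw [h]
      have hne' : y ≠ x := by
        intro hyx; subst hyx; simp at hy
      have hcount : pvPairCount x xs = 1 + pvPairCount y t := by
        rw [hsplit, pvPairCount_const _ _ _ (fun a ha => pvMemTakeWhileEq ha)]
        simp [pvPairCount, hne']
      have hlt : t.length ≤ n := by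
        have h1 : (y :: t).length ≤ xs.length := by
          rw [← h]; exact List.length_dropWhile_le _ _
        simp at h1; omega
      rw [ih t hlt y, hcount]

-- ===== VERDICT (by name: the statement is the Claim_ definition above) =====
theorem count_num_of_changes_py_spec : Claim_equal_count_num_of_changes_py := by
  intro xs _
  unfold Spec_count_num_of_changes_py count_num_of_changes_py count_num_of_changes_py_alt
  by_cases h : xs.length ≤ 1
  · simp [h]
  · rcases xs with _ | ⟨x, rest⟩
    · simp at h
    · rw [if_neg h, if_neg h, PySem.List.slice_from_one, List.tail_cons]
      have hA := pvFoldA rest [] x 0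
      simp only [List.nil_append, List.length_nil, Nat.zero_add, Nat.cast_one] at hA
      rw [pvGroups_eq rest.length rest le_rfl x]
      exact hA.trans (by ring)
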